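-- pv_equiv track=rewrite | github.com/Fish1/data-structures-and-algorithms | chapter-12/code/exercises/p1.py | add_until_100
-- ===== SOURCE A (Python) =====
-- def add_until_100(array):
--     if len(array) == 0:
--         return 0
--
--     subanswer = add_until_100(array[1:])
--
--     if array[0] + subanswer > 100:
--         return subanswer
--     else:
--         return array[0] + subanswer
-- ===== SOURCE B (Python) =====
-- def add_until_100(array):
--     total = 0
--     for x in reversed(array):
--         if x + total <= 100:
--             total += x
--     return total
-- ===== Notes on version B (the rewrite author's own statement) =====
-- stated objective: simpler
-- what changed: Replaces the linear recursion with list slicing by a single iterative reverse loop with an accumulator (no recursion, no per-call slice copies).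
import Mathlib
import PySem

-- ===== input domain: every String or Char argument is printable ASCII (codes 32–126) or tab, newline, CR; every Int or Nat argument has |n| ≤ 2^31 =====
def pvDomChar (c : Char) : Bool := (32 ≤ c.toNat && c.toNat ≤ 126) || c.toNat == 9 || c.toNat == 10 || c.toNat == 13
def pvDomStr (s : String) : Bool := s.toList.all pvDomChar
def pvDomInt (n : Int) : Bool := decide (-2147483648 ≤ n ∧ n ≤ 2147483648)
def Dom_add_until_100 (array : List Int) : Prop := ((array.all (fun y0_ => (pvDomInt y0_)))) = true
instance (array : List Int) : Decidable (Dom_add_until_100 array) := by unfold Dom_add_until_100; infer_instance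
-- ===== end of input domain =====

-- B replaces A's recursion-with-slicing by an iterative reverse loop with an accumulator (simpler, avoids per-call slice copies).

-- ===== PORT A =====
def add_until_100 : List Int → Int
  | [] => 0
  | x :: rest =>
    let subanswer := add_until_100 rest
    if x + subanswer > 100 then subanswer else x + subanswer

-- ===== PORT B =====
def add_until_100_alt (array : List Int) : Int :=
  array.reverse.foldl (fun total x => if x + total ≤ 100 then total + x else total) 0

-- ===== PRECONDITION & SPEC =====
def Spec_add_until_100 (array : List Int) (out : Int) : Prop := out = add_until_100_alt array
instance (array : List Int) (out : Int) : Decidable (Spec_add_until_100 array out) := by unfold Spec_add_until_100; infer_instance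

-- ===== CLAIM (what is proved, stated in full; the proofs are below) =====
def Claim_equal_add_until_100 : Prop := ∀ (array : List Int), Dom_add_until_100 array → Spec_add_until_100 array (add_until_100 array)

-- ===== LEMMAS AND PROOFS =====
theorem add_until_100_alt_cons (x : Int) (rest : List Int) :
    add_until_100_alt (x :: rest) =
      (if x + add_until_100_alt rest ≤ 100 then add_until_100_alt rest + x else add_until_100_alt rest) := by
  simp [add_until_100_alt, List.foldl_append]

-- ===== VERDICT (by name: the statement is the Claim_ definition above) =====
theorem add_until_100_eq (array : List Int) : add_until_100 array = add_until_100_alt array := by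
  induction array with
  | nil => simp [add_until_100, add_until_100_alt]
  | cons x rest ih =>
    rw [add_until_100_alt_cons, ← ih]
    simp only [add_until_100]
    split_ifs <;> omega

theorem add_until_100_spec : Claim_equal_add_until_100 := fun array _ => add_until_100_eq array
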